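-- pv_equiv track=rewrite | github.com/ruddra/play-with-pillow | pil_services/pil_services.py | _get_list_positions
-- ===== SOURCE A (Python) =====
-- def _get_list_positions(init_position, data, gap, is_horizontal=True):
--     """
--     Get List Text Positions
--     """
--     if not len(data) > 0:
--         return []
--     list_positions = [init_position]
--     for i in range(1, len(data)):
--         if not is_horizontal:
--             init_position = init_position[0] + gap, init_position[1]
--         else:
--             init_position = init_position[0], init_position[1] + gap
--         list_positions.append(init_position)
--     return list_positions
-- ===== SOURCE B (Python) =====
-- from itertools import accumulate
--
--
-- def _get_list_positions(init_position, data, gap, is_horizontal=True):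
--     if not data:
--         return []
--     step = (0, gap) if is_horizontal else (gap, 0)
--     deltas = [init_position] + [step] * (len(data) - 1)
--     return list(accumulate(deltas, lambda p, d: (p[0] + d[0], p[1] + d[1])))
-- ===== Notes on version B (the rewrite author's own statement) =====
-- stated objective: idiomatic
-- what changed: Replaced the index loop that mutates init_position and appends with a single itertools.accumulate scan over a delta list ([init_position] followed by len(data)-1 copies of the constant increment tuple).
import Mathlib
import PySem

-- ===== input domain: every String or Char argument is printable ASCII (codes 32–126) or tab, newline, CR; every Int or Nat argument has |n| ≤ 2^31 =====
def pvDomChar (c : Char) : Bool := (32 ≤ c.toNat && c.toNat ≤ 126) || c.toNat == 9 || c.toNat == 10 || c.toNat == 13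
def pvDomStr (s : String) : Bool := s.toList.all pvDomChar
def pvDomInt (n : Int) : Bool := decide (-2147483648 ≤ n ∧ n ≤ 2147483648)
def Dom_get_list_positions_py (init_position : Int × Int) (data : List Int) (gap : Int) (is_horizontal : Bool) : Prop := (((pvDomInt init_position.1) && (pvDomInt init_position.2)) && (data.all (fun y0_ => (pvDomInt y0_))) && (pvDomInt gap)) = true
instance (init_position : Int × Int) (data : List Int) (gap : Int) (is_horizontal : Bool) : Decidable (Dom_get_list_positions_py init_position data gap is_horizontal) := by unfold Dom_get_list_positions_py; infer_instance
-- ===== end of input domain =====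

-- B builds the positions with a scan (accumulate) over a delta list instead of A's index loop; same cost, more idiomatic.


-- ===== PORT A =====
def get_list_positions_py (init_position : Int × Int) (data : List Int) (gap : Int) (is_horizontal : Bool) : List (Int × Int) :=
  if ¬ (data.length > 0) then []
  else
    ((PySem.List.pyRange 1 data.length 1).foldl
      (fun (s : (Int × Int) × List (Int × Int)) (_ : Int) =>
        let ip := if ¬ is_horizontal then (s.1.1 + gap, s.1.2) else (s.1.1, s.1.2 + gap)
        (ip, s.2 ++ [ip]))
      (init_position, [init_position])).2

-- ===== PORT B =====
-- itertools.accumulate with the pairwise-add combiner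
def pvAccumAdd (p : Int × Int) : List (Int × Int) → List (Int × Int)
  | [] => [p]
  | d :: ds => p :: pvAccumAdd (p.1 + d.1, p.2 + d.2) ds

def get_list_positions_py_alt (init_position : Int × Int) (data : List Int) (gap : Int) (is_horizontal : Bool) : List (Int × Int) :=
  if data = [] then []
  else
    let step : Int × Int := if is_horizontal then (0, gap) else (gap, 0)
    pvAccumAdd init_position (List.replicate (data.length - 1) step)

-- ===== PRECONDITION & SPEC =====
def Spec_get_list_positions_py (init_position : Int × Int) (data : List Int) (gap : Int) (is_horizontal : Bool) (out : List (Int × Int)) : Prop := out = get_list_positions_py_alt init_position data gap is_horizontal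
instance (init_position : Int × Int) (data : List Int) (gap : Int) (is_horizontal : Bool) (out : List (Int × Int)) : Decidable (Spec_get_list_positions_py init_position data gap is_horizontal out) := by unfold Spec_get_list_positions_py; infer_instance

-- ===== CLAIM (what is proved, stated in full; the proofs are below) =====
def Claim_equal_get_list_positions_py : Prop := ∀ (init_position : Int × Int) (data : List Int) (gap : Int) (is_horizontal : Bool), Dom_get_list_positions_py init_position data gap is_horizontal → Spec_get_list_positions_py init_position data gap is_horizontal (get_list_positions_py init_position data gap is_horizontal)

-- ===== LEMMAS AND PROOFS =====
-- A's loop with the appended part factored out equals the accumulate scan over a replicate of the constant step.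
lemma foldl_eq_accum (g : Int × Int → Int × Int) (st : Int × Int)
    (hg : ∀ p, g p = (p.1 + st.1, p.2 + st.2)) :
    ∀ (l : List Int) (p : Int × Int) (acc : List (Int × Int)),
      (l.foldl (fun (s : (Int × Int) × List (Int × Int)) (_ : Int) => (g s.1, s.2 ++ [g s.1]))
        (p, acc ++ [p])).2 = acc ++ pvAccumAdd p (List.replicate l.length st) := by
  intro l
  induction l with
  | nil => intro p acc; simp [pvAccumAdd]
  | cons a l ih =>
    intro p acc
    simp only [List.foldl_cons, List.length_cons, List.replicate_succ, pvAccumAdd]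
    have := ih (g p) (acc ++ [p])
    rw [this, hg p]
    simp

theorem get_list_positions_py_spec_aux :
    ∀ (init_position : Int × Int) (data : List Int) (gap : Int) (is_horizontal : Bool),
      get_list_positions_py init_position data gap is_horizontal
        = get_list_positions_py_alt init_position data gap is_horizontal := by
  intro ip data gap h
  unfold get_list_positions_py get_list_positions_py_alt
  by_cases hd : data = []
  · subst hd; simp
  · have hlen : data.length > 0 := List.length_pos_iff.mpr hd
    rw [if_neg (not_not_intro hlen), if_neg hd]
    have hg : ∀ p : Int × Int,
        (if ¬ h then (p.1 + gap, p.2) else (p.1, p.2 + gap))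
          = (p.1 + (if h then ((0 : Int), gap) else (gap, (0 : Int))).1,
             p.2 + (if h then ((0 : Int), gap) else (gap, (0 : Int))).2) := by
      intro p; cases h <;> simp
    have := foldl_eq_accum
      (fun p => if ¬ h then (p.1 + gap, p.2) else (p.1, p.2 + gap))
      (if h then ((0 : Int), gap) else (gap, (0 : Int))) hg
      (PySem.List.pyRange 1 data.length 1) ip []
    simp only [List.nil_append] at this
    rw [this, PySem.List.length_pyRange_one,
      show ((data.length : Int) - 1).toNat = data.length - 1 by omega]

-- ===== VERDICT (by name: the statement is the Claim_ definition above) =====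
theorem get_list_positions_py_spec : Claim_equal_get_list_positions_py := by
  intro ip data gap h _
  exact get_list_positions_py_spec_aux ip data gap h
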